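-- pv_equiv track=rewrite | github.com/featurebyte/featurebyte | featurebyte/session/base.py | _sort_sql_objects
-- ===== SOURCE A (Python) =====
-- from typing import Any, AsyncGenerator, ClassVar, Dict, Literal, Optional, OrderedDict, Type
--
-- def _sort_sql_objects(items: list[dict[str, Any]]) -> list[dict[str, Any]]:
--     """
--     Order sql objects taking into account dependencies between then
--
--     Parameters
--     ----------
--     items: list[dict[str, Any]
--         SQL items to sort
--
--     Returns
--     -------
--     list[dict[str, Any]
--     """
--     depended_items = []
--     dependant_items = []
--     for item in items:
--         if item["identifier"] == "F_COUNT_DICT_MOST_FREQUENT_KEY_VALUE":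
--             depended_items.append(item)
--         else:
--             dependant_items.append(item)
--     return depended_items + dependant_items
-- ===== SOURCE B (Python) =====
-- def _sort_sql_objects(items):
--     """
--     Order sql objects taking into account dependencies between them.
--
--     One stable sort: the special identifier maps to False (sorts first),
--     everything else to True; Timsort's stability preserves relative order
--     within each group.
--     """
--     return sorted(
--         items,
--         key=lambda item: item["identifier"] != "F_COUNT_DICT_MOST_FREQUENT_KEY_VALUE",
--     )
-- ===== Notes on version B (the rewrite author's own statement) =====
-- stated objective: idiomatic
-- what changed: Replaces the explicit two-list partition loop with a single stable sort on a boolean key (special identifier sorts first); stability preserves within-group order.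
import Mathlib
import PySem

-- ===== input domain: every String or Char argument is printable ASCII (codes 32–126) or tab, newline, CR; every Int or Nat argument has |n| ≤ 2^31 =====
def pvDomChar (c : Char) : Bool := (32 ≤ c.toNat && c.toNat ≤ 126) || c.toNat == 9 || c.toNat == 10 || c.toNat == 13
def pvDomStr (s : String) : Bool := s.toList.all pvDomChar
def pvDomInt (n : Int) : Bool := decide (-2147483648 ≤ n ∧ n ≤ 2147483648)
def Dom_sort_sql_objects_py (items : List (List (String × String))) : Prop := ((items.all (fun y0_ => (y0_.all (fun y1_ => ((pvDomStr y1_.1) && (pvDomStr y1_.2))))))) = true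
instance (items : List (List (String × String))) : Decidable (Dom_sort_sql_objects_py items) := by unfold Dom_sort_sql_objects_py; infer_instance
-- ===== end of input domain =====

-- ===== PORT A =====
-- B replaces A's explicit two-list partition loop by one stable sort on a boolean key (idiomatic rewrite, same behaviour).
def sort_sql_objects_py (items : List (List (String × String))) : List (List (String × String)) :=
  let r := items.foldl
    (fun (acc : List (List (String × String)) × List (List (String × String))) item =>
      if PySem.Dict.getD ⟨item⟩ "identifier" "" == "F_COUNT_DICT_MOST_FREQUENT_KEY_VALUE" then
        (acc.1 ++ [item], acc.2)
      else
        (acc.1, acc.2 ++ [item]))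
    ([], [])
  r.1 ++ r.2

-- ===== PORT B =====
def sort_sql_objects_py_alt (items : List (List (String × String))) : List (List (String × String)) :=
  PySem.List.sorted items
    (fun item => PySem.Dict.getD ⟨item⟩ "identifier" "" != "F_COUNT_DICT_MOST_FREQUENT_KEY_VALUE")
    false

-- ===== PRECONDITION & SPEC =====
-- Pre_: every item must carry the key "identifier"; Python A raises KeyError (and B raises it in its sort key) otherwise.
def Pre_sort_sql_objects_py (items : List (List (String × String))) : Prop :=
  (items.all (fun item => (PySem.Dict.get? ⟨item⟩ "identifier").isSome)) = true
instance (items : List (List (String × String))) : Decidable (Pre_sort_sql_objects_py items) := by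
  unfold Pre_sort_sql_objects_py; infer_instance

def pvWitness_sort_sql_objects_py : (List (List (String × String))) :=
  [[("identifier", "a")], [("identifier", "F_COUNT_DICT_MOST_FREQUENT_KEY_VALUE")]]

def Spec_sort_sql_objects_py (items : List (List (String × String))) (out : List (List (String × String))) : Prop := out = sort_sql_objects_py_alt items
instance (items : List (List (String × String))) (out : List (List (String × String))) : Decidable (Spec_sort_sql_objects_py items out) := by unfold Spec_sort_sql_objects_py; infer_instance

-- ===== CLAIM (what is proved, stated in full; the proofs are below) =====
def Claim_equal_sort_sql_objects_py : Prop := ∀ (items : List (List (String × String))), Dom_sort_sql_objects_py items → Pre_sort_sql_objects_py items → Spec_sort_sql_objects_py items (sort_sql_objects_py items)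

-- ===== LEMMAS AND PROOFS =====

-- the boolean sort key both ports are about
def pvKey (item : List (String × String)) : Bool :=
  PySem.Dict.getD ⟨item⟩ "identifier" "" != "F_COUNT_DICT_MOST_FREQUENT_KEY_VALUE"

-- insertBy skips a prefix none of whose elements compare after x
theorem pv_insertBy_append {α : Type} (before : α → α → Bool) (x : α) (F T : List α)
    (hF : ∀ y ∈ F, before x y = false) :
    PySem.List.insertBy before x (F ++ T) = F ++ PySem.List.insertBy before x T := by
  induction F with
  | nil => rfl
  | cons f fs ih =>
    have hf : before x f = false := hF f (by simp)
    simp only [List.cons_append, PySem.List.insertBy, hf, Bool.false_eq_true, if_false]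
    exact congrArg (f :: ·) (ih (fun y hy => hF y (by simp [hy])))

-- inserting a false-key element in front of an all-true-key list
theorem pv_insertBy_front (x : List (String × String)) (T : List (List (String × String)))
    (hx : pvKey x = false) (hT : ∀ y ∈ T, pvKey y = true) :
    PySem.List.insertBy (fun a b => decide (pvKey a < pvKey b)) x T = x :: T := by
  cases T with
  | nil => rfl
  | cons t ts =>
    have ht : pvKey t = true := hT t (by simp)
    simp [PySem.List.insertBy, hx, ht]

-- the loop invariant: A's pair-of-lists loop equals B's insertion-sort loop
theorem pv_loop_eq (items : List (List (String × String))) :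
    ∀ (F T : List (List (String × String))),
      (∀ y ∈ F, pvKey y = false) → (∀ y ∈ T, pvKey y = true) →
      (let r := items.foldl
        (fun (acc : List (List (String × String)) × List (List (String × String))) item =>
          if PySem.Dict.getD ⟨item⟩ "identifier" "" == "F_COUNT_DICT_MOST_FREQUENT_KEY_VALUE" then
            (acc.1 ++ [item], acc.2)
          else
            (acc.1, acc.2 ++ [item])) (F, T)
       r.1 ++ r.2)
      = items.foldl
          (fun acc x => PySem.List.insertBy (fun a b => decide (pvKey a < pvKey b)) x acc) (F ++ T) := by
  induction items with
  | nil => intro F T _ _; rfl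
  | cons x xs ih =>
    intro F T hF hT
    by_cases hx : PySem.Dict.getD ⟨x⟩ "identifier" "" == "F_COUNT_DICT_MOST_FREQUENT_KEY_VALUE"
    · have hkx : pvKey x = false := by simp only [pvKey, bne, hx, Bool.not_true]
      have hstep : PySem.List.insertBy (fun a b => decide (pvKey a < pvKey b)) x (F ++ T)
          = (F ++ [x]) ++ T := by
        rw [pv_insertBy_append _ x F T (fun y hy => by
          have := hF y hy; simp [this, hkx]),
          pv_insertBy_front x T hkx hT]
        simp
      simp only [List.foldl_cons, hx, if_true, hstep]
      exact ih (F ++ [x]) T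
        (fun y hy => by rcases List.mem_append.mp hy with h | h
                        · exact hF y h
                        · simp only [List.mem_singleton] at h; subst h; exact hkx) hT
    · have hb : (PySem.Dict.getD ⟨x⟩ "identifier" "" == "F_COUNT_DICT_MOST_FREQUENT_KEY_VALUE") = false := by
        revert hx; cases PySem.Dict.getD (⟨x⟩ : PySem.Dict String String) "identifier" "" == "F_COUNT_DICT_MOST_FREQUENT_KEY_VALUE" <;> simp
      have hkx : pvKey x = true := by simp only [pvKey, bne, hb, Bool.not_false]
      have hstep : PySem.List.insertBy (fun a b => decide (pvKey a < pvKey b)) x (F ++ T)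
          = F ++ (T ++ [x]) := by
        rw [PySem.List.insertBy_of_forall_not_before _ x (F ++ T) (fun y hy => by
          simp [hkx])]
        simp
      simp only [List.foldl_cons, hb, Bool.false_eq_true, if_false, hstep]
      exact ih F (T ++ [x]) hF
        (fun y hy => by rcases List.mem_append.mp hy with h | h
                        · exact hT y h
                        · simp only [List.mem_singleton] at h; subst h; exact hkx)

-- ===== VERDICT (by name: the statement is the Claim_ definition above) =====
theorem sort_sql_objects_py_spec : Claim_equal_sort_sql_objects_py := by
  intro items _ _
  unfold Spec_sort_sql_objects_py sort_sql_objects_py sort_sql_objects_py_alt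
  rw [PySem.List.sorted_eq_foldl_insertBy]
  exact pv_loop_eq items [] [] (by simp) (by simp)
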